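-- pv_equiv track=rewrite | github.com/wcollings/spice_parser | spice_parser/scanner.py | remove_lc_markers
-- ===== SOURCE A (Python) =====
-- def remove_lc_markers(arr:list) ->list:
-- 	true_list=[]
-- 	nl=False
-- 	for elem in arr:
-- 		if nl==True or elem=='':
-- 			nl=False
-- 			continue
-- 		if '\n' in elem:
-- 			nl=True
-- 			elem=elem.strip()
-- 		true_list.append(elem)
-- 	return true_list
-- ===== SOURCE B (Python) =====
-- def remove_lc_markers(arr: list) -> list:
--     out = []
--     rest = arr
--     while True:
--         j = next((k for k, x in enumerate(rest) if '\n' in x), None)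
--         if j is None:
--             out.extend(x for x in rest if x != '')
--             return out
--         out.extend(x for x in rest[:j] if x != '')
--         out.append(rest[j].strip())
--         rest = rest[j+2:]
-- ===== Notes on version B (the rewrite author's own statement) =====
-- stated objective: alternative
-- what changed: B replaces A's element-by-element state machine with a carried skip flag by a segment-splitting loop: it repeatedly finds the next element containing a newline, bulk-filters empties out of the marker-free prefix, appends the stripped marker, and restarts two positions past it.
import Mathlib
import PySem

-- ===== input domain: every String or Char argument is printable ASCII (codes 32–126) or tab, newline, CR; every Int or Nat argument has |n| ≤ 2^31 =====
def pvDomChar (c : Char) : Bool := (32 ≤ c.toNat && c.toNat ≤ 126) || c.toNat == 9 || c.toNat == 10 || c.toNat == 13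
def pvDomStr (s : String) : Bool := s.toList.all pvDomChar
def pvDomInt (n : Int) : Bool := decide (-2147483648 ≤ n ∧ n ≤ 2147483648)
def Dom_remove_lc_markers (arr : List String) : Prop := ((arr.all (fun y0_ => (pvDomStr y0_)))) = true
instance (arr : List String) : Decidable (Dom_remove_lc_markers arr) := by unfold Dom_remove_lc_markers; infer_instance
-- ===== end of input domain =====

-- B replaces A's element-by-element state machine (carried skip flag) with a
-- segment-splitting algorithm: find the next element containing '\n', bulk-filter
-- empties from the marker-free prefix, append the stripped marker, restart two past it.

-- ===== PORT A =====
-- the body of A's for-loop, acting on the state (true_list, nl)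
def pvStepA (s : List String × Bool) (elem : String) : List String × Bool :=
  if s.2 = true ∨ elem = "" then (s.1, false)
  else if PySem.Str.isIn "\n" elem then (s.1 ++ [PySem.Str.strip elem], true)
  else (s.1 ++ [elem], false)

def remove_lc_markers (arr : List String) : List String :=
  (arr.foldl pvStepA (([] : List String), false)).1

-- ===== PORT B =====
-- B's while-loop over 'rest', one iteration per recursive call:
-- 'j = next(...)' is findIdx?, the two comprehensions are filters on the prefix/tail.
def remove_lc_markers_alt (rest : List String) : List String :=
  match h : rest.findIdx? (fun x => PySem.Str.isIn "\n" x) with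
  | none => rest.filter (fun x => decide (x ≠ ""))
  | some j =>
      (rest.take j).filter (fun x => decide (x ≠ "")) ++
      (PySem.Str.strip (rest.getD j "") :: remove_lc_markers_alt (rest.drop (j + 2)))
termination_by rest.length
decreasing_by
  have hj : j < rest.length := by
    rcases List.findIdx?_eq_some_iff_getElem.mp h with ⟨hlt, _⟩
    exact hlt
  simp only [List.length_drop]
  omega

-- ===== PRECONDITION & SPEC =====
def Spec_remove_lc_markers (arr : List String) (out : List String) : Prop := out = remove_lc_markers_alt arr
instance (arr : List String) (out : List String) : Decidable (Spec_remove_lc_markers arr out) := by unfold Spec_remove_lc_markers; infer_instance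

-- ===== CLAIM (what is proved, stated in full; the proofs are below) =====
def Claim_equal_remove_lc_markers : Prop := ∀ (arr : List String), Dom_remove_lc_markers arr → Spec_remove_lc_markers arr (remove_lc_markers arr)

-- ===== LEMMAS AND PROOFS =====

-- equation lemmas for B's port (one per branch of the match)
theorem pv_alt_none (arr : List String)
    (h : arr.findIdx? (fun x => PySem.Str.isIn "\n" x) = none) :
    remove_lc_markers_alt arr = arr.filter (fun x => decide (x ≠ "")) := by
  rw [remove_lc_markers_alt, h]

theorem pv_alt_some (arr : List String) (j : Nat)
    (h : arr.findIdx? (fun x => PySem.Str.isIn "\n" x) = some j) :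
    remove_lc_markers_alt arr = (arr.take j).filter (fun x => decide (x ≠ "")) ++
      (PySem.Str.strip (arr.getD j "") :: remove_lc_markers_alt (arr.drop (j + 2))) := by
  rw [remove_lc_markers_alt, h]

-- A's loop over a marker-free segment just filters out the empties, flag stays false
theorem pv_foldA_no_marker : ∀ (seg : List String) (acc : List String),
    (∀ x ∈ seg, PySem.Str.isIn "\n" x = false) →
    List.foldl pvStepA (acc, false) seg = (acc ++ seg.filter (fun x => decide (x ≠ "")), false) := by
  intro seg
  induction seg with
  | nil => intro acc _; simp
  | cons x rest ih =>
    intro acc hseg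
    have hx : PySem.Str.isIn "\n" x = false := hseg x (List.mem_cons_self)
    have hrest : ∀ y ∈ rest, PySem.Str.isIn "\n" y = false :=
      fun y hy => hseg y (List.mem_cons_of_mem _ hy)
    by_cases he : x = ""
    · have hstep : pvStepA (acc, false) x = (acc, false) := by
        simp only [pvStepA]; rw [if_pos (Or.inr he)]
      rw [List.foldl_cons, hstep, ih acc hrest, List.filter_cons, if_neg (by simp [he])]
    · have hstep : pvStepA (acc, false) x = (acc ++ [x], false) := by
        simp only [pvStepA]
        rw [if_neg (by simp [he]), if_neg (by rw [hx]; simp)]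
      rw [List.foldl_cons, hstep, ih (acc ++ [x]) hrest, List.filter_cons,
          if_pos (by simp [he])]
      simp

-- main loop invariant, by strong induction on the length
theorem pv_loopA_eq_alt : ∀ (n : Nat) (arr : List String), arr.length ≤ n →
    ∀ acc, (List.foldl pvStepA (acc, false) arr).1 = acc ++ remove_lc_markers_alt arr := by
  intro n
  induction n with
  | zero =>
    intro arr h acc
    have harr : arr = [] := List.eq_nil_of_length_eq_zero (Nat.le_zero.mp h)
    subst harr
    simp [remove_lc_markers_alt]
  | succ n ih =>
    intro arr h acc
    rcases hfind : arr.findIdx? (fun x => PySem.Str.isIn "\n" x) with _ | j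
    · -- no marker anywhere: pure filtering
      have hall : ∀ x ∈ arr, PySem.Str.isIn "\n" x = false := by
        intro x hx
        have := List.findIdx?_eq_none_iff.mp hfind x hx
        simpa using this
      rw [pv_foldA_no_marker arr acc hall, pv_alt_none arr hfind]
    · -- first marker at index j
      rcases List.findIdx?_eq_some_iff_getElem.mp hfind with ⟨hj, hpj, hbefore⟩
      have hsplit : arr = arr.take j ++ arr[j] :: arr.drop (j + 1) := by
        conv_lhs => rw [← List.take_append_drop j arr]
        rw [List.drop_eq_getElem_cons hj]
      have htake : ∀ x ∈ arr.take j, PySem.Str.isIn "\n" x = false := by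
        intro x hx
        rcases List.mem_take_iff_getElem.mp hx with ⟨i, hi, rfl⟩
        have hij : i < j := by simp at hi; omega
        simpa using hbefore i hij
      have hne : ¬ arr[j] = "" := by
        intro hh
        rw [hh] at hpj
        exact absurd hpj (by decide)
      have hstepM : ∀ l, pvStepA (l, false) arr[j] = (l ++ [PySem.Str.strip arr[j]], true) := by
        intro l
        simp only [pvStepA]
        rw [if_neg (by simp [hne]), if_pos hpj]
      have hgetD : arr.getD j "" = arr[j] := List.getD_eq_getElem arr "" hj
      rw [pv_alt_some arr j hfind]
      conv_lhs => rw [hsplit]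
      rw [List.foldl_append, pv_foldA_no_marker (arr.take j) acc htake, List.foldl_cons, hstepM]
      rcases hdrop : arr.drop (j + 1) with _ | ⟨y, tail⟩
      · -- marker is the last element; drop (j+2) is [] too
        have hd2 : arr.drop (j + 2) = [] := by
          have := congrArg List.tail hdrop
          rwa [List.tail_drop] at this
        rw [hd2]
        rw [pv_alt_none ([] : List String) rfl]
        simp [List.getD, List.getElem?_eq_getElem hj]
      · -- the element after the marker is consumed, then continue
        have hstepC : pvStepA (acc ++ List.filter (fun x => decide (x ≠ "")) (arr.take j)
            ++ [PySem.Str.strip arr[j]], true) y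
            = (acc ++ List.filter (fun x => decide (x ≠ "")) (arr.take j)
            ++ [PySem.Str.strip arr[j]], false) := by
          simp [pvStepA]
        have hd2 : arr.drop (j + 2) = tail := by
          have := congrArg List.tail hdrop
          rwa [List.tail_drop] at this
        have htl : tail.length ≤ n := by
          have := congrArg List.length hdrop
          simp at this
          omega
        rw [List.foldl_cons, hstepC, ih tail htl, hd2, hgetD]
        simp

-- ===== VERDICT (by name: the statement is the Claim_ definition above) =====
theorem remove_lc_markers_spec : Claim_equal_remove_lc_markers := by
  intro arr _
  unfold Spec_remove_lc_markers remove_lc_markers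
  simpa using pv_loopA_eq_alt arr.length arr le_rfl []
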